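-- pv_equiv track=rewrite | github.com/JulietaCaro/python | Funciones/Ejercicio 14.py | digitoCentral
-- ===== SOURCE A (Python) =====
-- def digitoCentral(a):
--     contD = 0
--     num = a
--     while num!=0:
--         digito = num % 10
--         contD = contD + 1
--         num = num // 10
--     if contD % 2 != 0:
--         contD = (contD//2)+1
--         for i in range (0, contD):
--             digito = a % 10
--             a = a//10
--     else:
--         digito = -1
--     return digito
-- ===== SOURCE B (Python) =====
-- def digitoCentral(a):
--     p, n = 1, 0
--     while p <= a:
--         p *= 10
--         n += 1
--     if n % 2 == 0:
--         return -1
--     return (a // 10 ** (n // 2)) % 10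
-- ===== Notes on version B (the rewrite author's own statement) =====
-- stated objective: simpler
-- what changed: B counts digits by growing a power of ten compared against a (instead of peeling digits off a copy) and extracts the central digit with one closed-form division/modulo instead of A's second digit-peeling loop.
import Mathlib
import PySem

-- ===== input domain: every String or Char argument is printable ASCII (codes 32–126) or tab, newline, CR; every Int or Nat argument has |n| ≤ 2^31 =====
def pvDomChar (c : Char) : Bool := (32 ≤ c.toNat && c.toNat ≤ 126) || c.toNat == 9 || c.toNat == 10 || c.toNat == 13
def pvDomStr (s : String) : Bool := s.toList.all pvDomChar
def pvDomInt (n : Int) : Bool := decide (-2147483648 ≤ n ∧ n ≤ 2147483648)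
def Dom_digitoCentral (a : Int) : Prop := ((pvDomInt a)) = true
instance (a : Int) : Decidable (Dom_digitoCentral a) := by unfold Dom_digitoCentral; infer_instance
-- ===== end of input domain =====

-- B replaces A's two digit-peeling loops by one power-of-ten counting loop plus a
-- closed-form division/modulo for the central digit (objective: simpler, same O(d) cost).

-- floordiv by a nonnegative divisor agrees with Lean's ediv (cited by pvCountLoop's decreasing_by)
theorem pvFdiv (x m : Int) (h : 0 ≤ m) : PySem.Int.floordiv x m = x / m := by
  simp [PySem.Int.floordiv, Int.fdiv_eq_ediv, h]


-- ===== PORT A =====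
-- 'contD = 0; num = a; while num != 0: digito = num % 10; contD += 1; num = num // 10'.
-- For num < 0 the Python loop never terminates (num//10 stabilises at -1); that case is
-- excluded by Pre_digitoCentral, the 'num < 0' branch below is only a totality guard.
def pvCountLoop (num contD : Int) : Int :=
  if num = 0 then contD
  else if num < 0 then contD
  else pvCountLoop (PySem.Int.floordiv num 10) (contD + 1)
termination_by num.toNat
decreasing_by
  rw [pvFdiv num 10 (by norm_num)]
  omega

def digitoCentral (a : Int) : Int :=
  if PySem.Int.mod (pvCountLoop a 0) 2 ≠ 0 then
    -- contD = (contD//2)+1; for i in range(0, contD): digito = a % 10; a = a // 10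
    -- the fold state is (digito, a); the initial digito 0 is never the result since the
    -- range is nonempty here (contD odd ⇒ contD//2 + 1 ≥ 1)
    ((PySem.List.pyRange 0 (PySem.Int.floordiv (pvCountLoop a 0) 2 + 1)).foldl
      (fun (st : Int × Int) _ => (PySem.Int.mod st.2 10, PySem.Int.floordiv st.2 10)) (0, a)).1
  else -1

-- ===== PORT B =====
-- 'p, n = 1, 0; while p <= a: p *= 10; n += 1'.  p is always ≥ 1 at every call
-- (it starts at 1 and grows); the '1 ≤ p' conjunct is only a totality guard.
def pvPowLoop (a p n : Int) : Int :=
  if h : 1 ≤ p ∧ p ≤ a then pvPowLoop a (p * 10) (n + 1) else n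
termination_by (a + 1 - p).toNat
decreasing_by omega

-- n = pvPowLoop a 1 0 is always ≥ 0, so '.toNat' on the exponent is exact for 10 ** (n // 2)
def digitoCentral_alt (a : Int) : Int :=
  if PySem.Int.mod (pvPowLoop a 1 0) 2 = 0 then -1
  else PySem.Int.mod (PySem.Int.floordiv a ((10 : Int) ^ (PySem.Int.floordiv (pvPowLoop a 1 0) 2).toNat)) 10

-- ===== PRECONDITION & SPEC =====
-- Pre_ excludes negative a, on which the Python A's while loop never terminates
-- (num // 10 stabilises at -1), so A returns on exactly the inputs admitted here.
def Pre_digitoCentral (a : Int) : Prop := 0 ≤ a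
instance (a : Int) : Decidable (Pre_digitoCentral a) := by unfold Pre_digitoCentral; infer_instance

def pvWitness_digitoCentral : Int := 12345

def Spec_digitoCentral (a : Int) (out : Int) : Prop := out = digitoCentral_alt a
instance (a : Int) (out : Int) : Decidable (Spec_digitoCentral a out) := by unfold Spec_digitoCentral; infer_instance

-- ===== CLAIM (what is proved, stated in full; the proofs are below) =====
def Claim_equal_digitoCentral : Prop := ∀ (a : Int), Dom_digitoCentral a → Pre_digitoCentral a → Spec_digitoCentral a (digitoCentral a)

-- ===== LEMMAS AND PROOFS =====

theorem pvMod (x m : Int) (h : 0 ≤ m) : PySem.Int.mod x m = x % m := by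
  simp [PySem.Int.mod, Int.fmod_eq_emod, h]

-- number of decimal digits of a natural number (0 has none, matching A's loop)
def pvDcount (n : Nat) : Nat :=
  if h : n = 0 then 0 else pvDcount (n / 10) + 1
decreasing_by exact Nat.div_lt_self (Nat.pos_of_ne_zero h) (by norm_num)

theorem pvCountLoop_eq (n : Nat) : ∀ (c : Int), pvCountLoop (n : Int) c = c + pvDcount n := by
  induction n using Nat.strong_induction_on with
  | _ n ih =>
    intro c
    by_cases h : n = 0
    · subst h; rw [pvCountLoop, pvDcount]; simp
    · rw [pvCountLoop]
      have h0 : ¬ ((n : Int) = 0) := by omega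
      have h1 : ¬ ((n : Int) < 0) := by omega
      rw [if_neg h0, if_neg h1, pvFdiv _ 10 (by norm_num)]
      have hdiv : (n : Int) / 10 = ((n / 10 : Nat) : Int) := by omega
      rw [hdiv, ih (n / 10) (Nat.div_lt_self (Nat.pos_of_ne_zero h) (by norm_num))]
      conv_rhs => rw [pvDcount]
      rw [dif_neg h]
      push_cast
      ring

theorem pvPowLoop_eq (m : Nat) : ∀ (n j : Nat) (k : Int), n + 1 - 10 ^ j ≤ m →
    pvPowLoop (n : Int) ((10 : Int) ^ j) k = k + pvDcount (n / 10 ^ j) := by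
  induction m with
  | zero =>
    intro n j k hm
    have hlt : n < 10 ^ j := by omega
    have hlt' : (n : Int) < (10 : Int) ^ j := by exact_mod_cast hlt
    rw [pvPowLoop, dif_neg (by omega)]
    rw [Nat.div_eq_of_lt hlt, pvDcount]
    simp
  | succ m ih =>
    intro n j k hm
    by_cases hle : 10 ^ j ≤ n
    · have hp : (1 : Int) ≤ (10 : Int) ^ j := one_le_pow₀ (by norm_num)
      rw [pvPowLoop, dif_pos ⟨hp, by exact_mod_cast hle⟩]
      have hpow : (10 : Int) ^ j * 10 = (10 : Int) ^ (j + 1) := (pow_succ 10 j).symm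
      have hmono : 10 ^ j + 1 ≤ 10 ^ (j + 1) := by
        have : 1 ≤ 10 ^ j := Nat.one_le_pow _ _ (by norm_num)
        calc 10 ^ j + 1 ≤ 10 ^ j * 10 := by omega
          _ = 10 ^ (j + 1) := (pow_succ 10 j).symm
      rw [hpow, ih n (j + 1) (k + 1) (by omega)]
      have hq : n / 10 ^ (j + 1) = n / 10 ^ j / 10 := by
        rw [pow_succ, ← Nat.div_div_eq_div_mul]
      have hnz : n / 10 ^ j ≠ 0 := by
        have := Nat.div_pos hle (Nat.pow_pos (by norm_num))
        omega
      rw [hq]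
      conv_rhs => rw [pvDcount, dif_neg hnz]
      push_cast
      ring
    · have hlt : n < 10 ^ j := by omega
      have hlt' : (n : Int) < (10 : Int) ^ j := by exact_mod_cast hlt
      rw [pvPowLoop, dif_neg (by omega)]
      rw [Nat.div_eq_of_lt hlt, pvDcount]
      simp

theorem pvFoldConst {α β : Type} (l : List α) (g : β → β) :
    ∀ s : β, l.foldl (fun s _ => g s) s = g^[l.length] s := by
  induction l with
  | nil => intro s; simp
  | cons x xs ihl =>
    intro s
    simp [List.foldl_cons, ihl, Function.iterate_succ_apply]

theorem pvStepIter (m : Nat) : ∀ (d x : Int),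
    (fun (st : Int × Int) => (PySem.Int.mod st.2 10, PySem.Int.floordiv st.2 10))^[m + 1] (d, x)
      = (PySem.Int.mod ((fun y => PySem.Int.floordiv y 10)^[m] x) 10,
         (fun y => PySem.Int.floordiv y 10)^[m + 1] x) := by
  induction m with
  | zero => intro d x; simp
  | succ m ihm =>
    intro d x
    rw [Function.iterate_succ_apply' _ (m + 1), ihm d x,
      Function.iterate_succ_apply' (fun y => PySem.Int.floordiv y 10) (m + 1)]

theorem pvIterDiv (N : Nat) : ∀ (k : Nat),
    (fun y => PySem.Int.floordiv y 10)^[k] (N : Int) = ((N / 10 ^ k : Nat) : Int) := by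
  intro k
  induction k with
  | zero => simp
  | succ k ihk =>
    rw [Function.iterate_succ_apply', ihk, pvFdiv _ 10 (by norm_num)]
    have h : N / 10 ^ (k + 1) = N / 10 ^ k / 10 := by
      rw [pow_succ, ← Nat.div_div_eq_div_mul]
    rw [h]
    omega

-- ===== VERDICT (by name: the statement is the Claim_ definition above) =====
theorem digitoCentral_spec : Claim_equal_digitoCentral := by
  intro a _ hpre
  unfold Spec_digitoCentral
  have ha : (0 : Int) ≤ a := hpre
  obtain ⟨N, rfl⟩ : ∃ N : Nat, a = (N : Int) := ⟨a.toNat, by omega⟩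
  unfold digitoCentral digitoCentral_alt
  have hcount : pvCountLoop (N : Int) 0 = (pvDcount N : Int) := by
    rw [pvCountLoop_eq N 0]; ring
  have hpow : pvPowLoop (N : Int) 1 0 = (pvDcount N : Int) := by
    have := pvPowLoop_eq (N + 1) N 0 0 (by simp)
    simpa using this
  rw [hcount, hpow]
  have hmod2 : PySem.Int.mod ((pvDcount N : Nat) : Int) 2 = ((pvDcount N % 2 : Nat) : Int) := by
    rw [pvMod _ 2 (by norm_num)]; omega
  rw [hmod2]
  by_cases hpar : pvDcount N % 2 = 0
  · simp [hpar]
  · have hodd : pvDcount N % 2 = 1 := Nat.mod_two_eq_zero_or_one (pvDcount N) |>.resolve_left hpar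
    rw [if_pos (by omega), if_neg (by omega)]
    have hfd2 : PySem.Int.floordiv ((pvDcount N : Nat) : Int) 2 = ((pvDcount N / 2 : Nat) : Int) := by
      rw [pvFdiv _ 2 (by norm_num)]; omega
    rw [hfd2]
    have hlen : (PySem.List.pyRange 0 (((pvDcount N / 2 : Nat) : Int) + 1)).length
        = pvDcount N / 2 + 1 := by
      rw [PySem.List.length_pyRange_one]; omega
    rw [pvFoldConst, hlen, pvStepIter (pvDcount N / 2) 0 (N : Int), pvIterDiv N (pvDcount N / 2)]
    have htn : (((pvDcount N / 2 : Nat) : Int)).toNat = pvDcount N / 2 := by omega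
    rw [htn, pvFdiv _ _ (by positivity)]
    have hcast : ((10 : Int)) ^ (pvDcount N / 2) = ((10 ^ (pvDcount N / 2) : Nat) : Int) := by
      push_cast; ring
    rw [hcast]
    have hdivc : (N : Int) / ((10 ^ (pvDcount N / 2) : Nat) : Int)
        = ((N / 10 ^ (pvDcount N / 2) : Nat) : Int) := by
      push_cast; ring
    rw [hdivc]
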